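-- pv_equiv track=rewrite | github.com/Aroton/AroMCP | src/aromcp/analysis_server/tools/find_references.py | _is_test_file
-- ===== SOURCE A (Python) =====
-- def _is_test_file(file_path: str) -> bool:
--     """Check if a file is a test file based on common patterns."""
--     import os
--
--     filename = os.path.basename(file_path).lower()
--
--     # Common test file patterns
--     test_patterns = [
--         ".test.ts",
--         ".test.tsx",
--         ".test.js",
--         ".test.jsx",
--         ".spec.ts",
--         ".spec.tsx",
--         ".spec.js",
--         ".spec.jsx",
--         "_test.ts",
--         "_test.tsx",
--         "_test.js",
--         "_test.jsx",
--         ".tests.ts",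
--         ".tests.tsx",
--         ".tests.js",
--         ".tests.jsx",
--     ]
--
--     return any(filename.endswith(pattern) for pattern in test_patterns)
-- ===== SOURCE B (Python) =====
-- def _is_test_file(file_path: str) -> bool:
--     """Check if a file is a test file based on common patterns."""
--     filename = file_path[file_path.rfind("/") + 1:].lower()
--     stem, dot, ext = filename.rpartition(".")
--     return dot == "." and ext in ("ts", "tsx", "js", "jsx") and stem.endswith((".test", ".spec", "_test", ".tests"))
-- ===== Notes on version B (the rewrite author's own statement) =====
-- stated objective: simpler
-- what changed: Replaces the flat scan over the 4x4 list of 16 concatenated suffixes by one rpartition at the last dot: check the extension against 4 strings, then the stem's marker suffix against 4 strings.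
import Mathlib
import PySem

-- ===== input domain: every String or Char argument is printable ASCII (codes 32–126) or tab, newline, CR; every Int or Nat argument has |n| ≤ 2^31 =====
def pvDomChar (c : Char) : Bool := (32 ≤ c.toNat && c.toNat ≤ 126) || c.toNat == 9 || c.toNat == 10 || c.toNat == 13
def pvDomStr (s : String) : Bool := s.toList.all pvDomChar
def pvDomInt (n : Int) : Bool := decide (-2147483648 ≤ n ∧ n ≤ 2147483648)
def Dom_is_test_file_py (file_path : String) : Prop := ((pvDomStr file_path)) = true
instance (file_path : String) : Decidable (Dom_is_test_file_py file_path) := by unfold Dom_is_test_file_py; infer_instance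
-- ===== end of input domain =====

-- B replaces A's scan over 16 marker+extension suffix strings by one rpartition at the
-- last dot followed by a 4-extension check and a 4-marker stem-suffix check (simpler).

-- ===== PORT A =====
-- os.path.basename (POSIX): p[p.rfind('/')+1:]
def pvBasename (cs : List Char) : List Char :=
  PySem.List.slice cs (some (PySem.Chars.rfind cs ['/'] + 1)) none

def pvTestPatterns : List (List Char) :=
  [".test.ts".toList, ".test.tsx".toList, ".test.js".toList, ".test.jsx".toList,
   ".spec.ts".toList, ".spec.tsx".toList, ".spec.js".toList, ".spec.jsx".toList,
   "_test.ts".toList, "_test.tsx".toList, "_test.js".toList, "_test.jsx".toList,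
   ".tests.ts".toList, ".tests.tsx".toList, ".tests.js".toList, ".tests.jsx".toList]

def is_test_file_py (file_path : String) : Bool :=
  let filename := PySem.Chars.lower (pvBasename file_path.toList)
  pvTestPatterns.any (fun pattern => PySem.Chars.endswith filename pattern)

-- ===== PORT B =====
-- s.rpartition(".") restricted to what B uses: some (stem, ext) splits at the LAST '.',
-- none means no '.' occurs (Python's ('', '', s) case, where B returns False).
def pvRpartDot : List Char → Option (List Char × List Char)
  | [] => none
  | c :: rest =>
    match pvRpartDot rest with
    | some (s, e) => some (c :: s, e)
    | none => if c = '.' then some ([], rest) else none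

def pvTestExts : List (List Char) := ["ts".toList, "tsx".toList, "js".toList, "jsx".toList]
def pvTestMarkers : List (List Char) := [".test".toList, ".spec".toList, "_test".toList, ".tests".toList]

def is_test_file_py_alt (file_path : String) : Bool :=
  let filename := PySem.Chars.lower (pvBasename file_path.toList)
  match pvRpartDot filename with
  | none => false
  | some (stem, ext) =>
    pvTestExts.contains ext && pvTestMarkers.any (fun m => PySem.Chars.endswith stem m)

-- ===== PRECONDITION & SPEC =====
def Spec_is_test_file_py (file_path : String) (out : Bool) : Prop := out = is_test_file_py_alt file_path
instance (file_path : String) (out : Bool) : Decidable (Spec_is_test_file_py file_path out) := by unfold Spec_is_test_file_py; infer_instance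

-- ===== CLAIM (what is proved, stated in full; the proofs are below) =====
def Claim_equal_is_test_file_py : Prop := ∀ (file_path : String), Dom_is_test_file_py file_path → Spec_is_test_file_py file_path (is_test_file_py file_path)

-- ===== LEMMAS AND PROOFS =====

lemma pvRpartDot_of_not_mem {cs : List Char} (h : '.' ∉ cs) : pvRpartDot cs = none := by
  induction cs with
  | nil => rfl
  | cons c rest ih =>
    have hc : c ≠ '.' := by intro e; exact h (e ▸ List.mem_cons_self)
    have hr : '.' ∉ rest := fun hm => h (List.mem_cons_of_mem _ hm)
    simp [pvRpartDot, ih hr, hc]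

lemma pvRpartDot_none {cs : List Char} (h : pvRpartDot cs = none) : '.' ∉ cs := by
  induction cs with
  | nil => simp
  | cons c rest ih =>
    intro hm
    rcases List.mem_cons.mp hm with hc | hr
    · simp [pvRpartDot, ← hc] at h
      rcases hx : pvRpartDot rest with _ | ⟨s, e⟩ <;> simp [hx] at h
    · have : pvRpartDot rest = none := by
        simp [pvRpartDot] at h
        rcases hx : pvRpartDot rest with _ | ⟨s, e⟩
        · rfl
        · simp [hx] at h
      exact ih this hr

lemma pvRpartDot_some {cs s e : List Char} (h : pvRpartDot cs = some (s, e)) :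
    cs = s ++ '.' :: e ∧ '.' ∉ e := by
  induction cs generalizing s e with
  | nil => simp [pvRpartDot] at h
  | cons c rest ih =>
    simp only [pvRpartDot] at h
    rcases hx : pvRpartDot rest with _ | ⟨s', e'⟩
    · rw [hx] at h
      by_cases hc : c = '.'
      · simp [hc] at h
        obtain ⟨hs, he⟩ := h
        subst hs; subst he; subst hc
        exact ⟨rfl, pvRpartDot_none hx⟩
      · simp [hc] at h
    · rw [hx] at h
      simp at h
      obtain ⟨hs, he⟩ := h
      obtain ⟨hrest, hne⟩ := ih hx
      subst he
      refine ⟨?_, hne⟩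
      rw [← hs, hrest]; rfl

lemma pvRpartDot_complete {s e : List Char} (he : '.' ∉ e) :
    pvRpartDot (s ++ '.' :: e) = some (s, e) := by
  induction s with
  | nil => simp [pvRpartDot, pvRpartDot_of_not_mem he]
  | cons c s' ih => simp [pvRpartDot, ih]

-- A's 16-pattern list is exactly marker-major concatenation of markers and extensions.
lemma pvPatterns_eq :
    pvTestPatterns = pvTestMarkers.flatMap (fun m => pvTestExts.map (fun e => m ++ '.' :: e)) := by
  decide

lemma pvExts_no_dot : ∀ e ∈ pvTestExts, '.' ∉ e := by decide

-- The core equivalence, on an arbitrary character list in place of the lowered basename.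
lemma pv_core_eq (cs : List Char) :
    pvTestPatterns.any (fun pattern => PySem.Chars.endswith cs pattern) =
      (match pvRpartDot cs with
       | none => false
       | some (stem, ext) =>
         pvTestExts.contains ext && pvTestMarkers.any (fun m => PySem.Chars.endswith stem m)) := by
  rw [pvPatterns_eq, Bool.eq_iff_iff]
  rcases hx : pvRpartDot cs with _ | ⟨stem, ext⟩
  · simp only [List.any_eq_true, List.mem_flatMap, List.mem_map, PySem.Chars.endswith_iff]
    constructor
    · rintro ⟨p, ⟨m, -, e, -, rfl⟩, hsuf⟩
      exact absurd (hsuf.subset (by simp)) (pvRpartDot_none hx)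
    · rintro ⟨⟩
  · obtain ⟨hcs, hne⟩ := pvRpartDot_some hx
    simp only [List.any_eq_true, List.mem_flatMap, List.mem_map, PySem.Chars.endswith_iff,
      Bool.and_eq_true, List.contains_eq_mem, decide_eq_true_eq]
    constructor
    · rintro ⟨p, ⟨m, hm, e, he, rfl⟩, u, hu⟩
      have : pvRpartDot cs = some (u ++ m, e) := by
        rw [← hu, show u ++ (m ++ '.' :: e) = (u ++ m) ++ '.' :: e by simp]
        exact pvRpartDot_complete (pvExts_no_dot e he)
      rw [hx] at this
      obtain ⟨hs, hee⟩ := by simpa using this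
      subst hee
      exact ⟨he, m, hm, u, hs.symm⟩
    · rintro ⟨hext, m, hm, u, hstem⟩
      refine ⟨m ++ '.' :: ext, ⟨m, hm, ext, hext, rfl⟩, u, ?_⟩
      rw [hcs, ← hstem]; simp

-- ===== VERDICT (by name: the statement is the Claim_ definition above) =====
theorem is_test_file_py_spec : Claim_equal_is_test_file_py := by
  intro file_path _
  unfold Spec_is_test_file_py is_test_file_py is_test_file_py_alt
  exact pv_core_eq _
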